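-- pv_equiv track=rewrite | github.com/LetsTalktotheMoon/workpipe | runtime/resume_atomizer/transplant_resume.py | choose_summary_source
-- ===== SOURCE A (Python) =====
-- def choose_summary_source(
--     base_id: int,
--     sources: dict[str, int],
--     all_parsed: dict[int, dict],
-- ) -> int:
--     """
--     当多数工作段被移植时，自动切换 Summary 来源以保持人设连贯。
--
--     规则:
--     - 如果 ≥2 段工作经历来自同一非 base 简历，使用该简历的 Summary
--     - 否则保持 base Summary
--     """
--     from collections import Counter
--     source_counts = Counter(sources.values())
--     # 找出出现次数最多的 source（排除 base 自身）
--     for src_id, count in source_counts.most_common():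
--         if src_id != base_id and count >= 2:
--             # 确认该 source 有 summary
--             if all_parsed.get(src_id, {}).get('summary'):
--                 return src_id
--     return base_id
-- ===== SOURCE B (Python) =====
-- def choose_summary_source(
--     base_id: int,
--     sources: dict[str, int],
--     all_parsed: dict[int, dict],
-- ) -> int:
--     counts = {}
--     for v in sources.values():
--         counts[v] = counts.get(v, 0) + 1
--     best = None
--     for src_id, count in counts.items():
--         if (src_id != base_id and count >= 2
--                 and (best is None or count > best[1])
--                 and all_parsed.get(src_id, {}).get('summary')):
--             best = (src_id, count)
--     return base_id if best is None else best[0]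
-- ===== Notes on version B (the rewrite author's own statement) =====
-- stated objective: simpler
-- what changed: Replaces Counter.most_common() (a full sort of the frequency table, then an early-return scan) with a single linear max-scan over the frequency dict that keeps the best fully-qualifying candidate, using strict '>' to reproduce most_common's insertion-order tie-break.
import Mathlib
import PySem

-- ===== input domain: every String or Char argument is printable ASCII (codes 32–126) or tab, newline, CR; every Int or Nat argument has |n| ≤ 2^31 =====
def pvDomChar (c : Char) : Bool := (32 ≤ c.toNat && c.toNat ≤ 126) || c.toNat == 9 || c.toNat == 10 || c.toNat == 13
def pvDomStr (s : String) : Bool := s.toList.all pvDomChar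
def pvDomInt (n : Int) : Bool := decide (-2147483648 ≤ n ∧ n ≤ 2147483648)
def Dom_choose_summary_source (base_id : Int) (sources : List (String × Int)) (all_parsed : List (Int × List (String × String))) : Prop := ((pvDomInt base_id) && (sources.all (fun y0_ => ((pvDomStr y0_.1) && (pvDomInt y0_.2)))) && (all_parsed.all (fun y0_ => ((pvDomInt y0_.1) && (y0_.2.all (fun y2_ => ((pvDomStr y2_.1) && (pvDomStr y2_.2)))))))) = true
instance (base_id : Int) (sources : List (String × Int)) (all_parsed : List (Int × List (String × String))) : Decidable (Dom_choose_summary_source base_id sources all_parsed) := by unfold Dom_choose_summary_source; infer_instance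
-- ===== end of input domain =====

-- B replaces Counter.most_common() (sort of the frequency table + early-return scan) by one
-- linear max-scan keeping the best fully-qualifying source (strict '>' preserves the
-- insertion-order tie-break); objective: simpler.

-- ===== PORT A =====
-- all_parsed.get(src_id, {}).get('summary') is truthy (a non-empty string)
def cssHasSummary (all_parsed : List (Int × List (String × String))) (src : Int) : Bool :=
  match (PySem.Dict.mk ((PySem.Dict.mk all_parsed).getD src [])).get? "summary" with
  | none => false
  | some s => decide (s ≠ "")

-- the 'for src_id, count in … : if …: if …: return src_id' loop with its early return
def cssLoop (base_id : Int) (all_parsed : List (Int × List (String × String))) : List (Int × Int) → Int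
  | [] => base_id
  | p :: rest =>
      if p.1 ≠ base_id ∧ 2 ≤ p.2 then
        if cssHasSummary all_parsed p.1 then p.1 else cssLoop base_id all_parsed rest
      else cssLoop base_id all_parsed rest

def choose_summary_source (base_id : Int) (sources : List (String × Int)) (all_parsed : List (Int × List (String × String))) : Int :=
  let source_counts := PySem.Dict.counter (sources.map (·.2))
  -- most_common() = the items stably sorted by count, descending
  cssLoop base_id all_parsed (PySem.List.sorted source_counts.items (fun p => p.2) true)

-- ===== PORT B =====
-- one step of Source B's max-scan: update best only when every filter passes AND the count is strictly larger
def cssAltStep (base_id : Int) (all_parsed : List (Int × List (String × String))) (best : Option (Int × Int)) (p : Int × Int) : Option (Int × Int) :=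
  if (decide (p.1 ≠ base_id) && decide (2 ≤ p.2)
      && (match best with | none => true | some y => decide (y.2 < p.2))
      && cssHasSummary all_parsed p.1) then some p else best

def choose_summary_source_alt (base_id : Int) (sources : List (String × Int)) (all_parsed : List (Int × List (String × String))) : Int :=
  let counts := (sources.map (·.2)).foldl (fun d v => d.insert v (d.getD v 0 + 1)) PySem.Dict.empty
  match counts.items.foldl (cssAltStep base_id all_parsed) none with
  | none => base_id
  | some y => y.1

-- ===== PRECONDITION & SPEC =====
def Spec_choose_summary_source (base_id : Int) (sources : List (String × Int)) (all_parsed : List (Int × List (String × String))) (out : Int) : Prop := out = choose_summary_source_alt base_id sources all_parsed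
instance (base_id : Int) (sources : List (String × Int)) (all_parsed : List (Int × List (String × String))) (out : Int) : Decidable (Spec_choose_summary_source base_id sources all_parsed out) := by unfold Spec_choose_summary_source; infer_instance

-- ===== CLAIM (what is proved, stated in full; the proofs are below) =====
def Claim_equal_choose_summary_source : Prop := ∀ (base_id : Int) (sources : List (String × Int)) (all_parsed : List (Int × List (String × String))), Dom_choose_summary_source base_id sources all_parsed → Spec_choose_summary_source base_id sources all_parsed (choose_summary_source base_id sources all_parsed)

-- ===== LEMMAS AND PROOFS =====

-- the qualification test, as one Bool predicate
def cssQ (base_id : Int) (all_parsed : List (Int × List (String × String))) (p : Int × Int) : Bool :=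
  decide (p.1 ≠ base_id) && decide (2 ≤ p.2) && cssHasSummary all_parsed p.1

lemma cssLoop_eq_find? (base_id : Int) (ap : List (Int × List (String × String))) (l : List (Int × Int)) :
    cssLoop base_id ap l = match l.find? (cssQ base_id ap) with
      | none => base_id
      | some y => y.1 := by
  induction l with
  | nil => rfl
  | cons p rest ih =>
      by_cases ha : p.1 = base_id
      · simp [cssLoop, cssQ, List.find?, ha, ih]
      · by_cases hb : 2 ≤ p.2
        · by_cases h2 : cssHasSummary ap p.1 = true <;>
            · simp [cssLoop, cssQ, List.find?, ha, hb, h2, ih]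
        · simp [cssLoop, cssQ, List.find?, ha, hb, ih]

lemma cssAltStep_eq (base_id : Int) (ap : List (Int × List (String × String))) (best : Option (Int × Int)) (p : Int × Int) :
    cssAltStep base_id ap best p = match best with
      | none => if cssQ base_id ap p then some p else none
      | some y => if cssQ base_id ap p && decide (y.2 < p.2) then some p else some y := by
  cases best
  · simp [cssAltStep, cssQ]
  · simp [cssAltStep, cssQ]
    split_ifs <;> tauto

-- inserting x (stably, after all ≥-count elements) into a count-descending list
-- shifts first-match exactly like one max-scan step
lemma find?_insertBy (q : Int × Int → Bool) (x : Int × Int) (s : List (Int × Int))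
    (hs : s.Pairwise (fun a b => b.2 ≤ a.2)) :
    (PySem.List.insertBy (fun a b => decide (b.2 < a.2)) x s).find? q =
      match s.find? q with
      | none => if q x then some x else none
      | some y => if q x && decide (y.2 < x.2) then some x else some y := by
  induction s with
  | nil =>
      simp [PySem.List.insertBy, List.find?]
  | cons z s' ih =>
      have hz : ∀ y ∈ s', y.2 ≤ z.2 := by
        intro y hy; exact (List.pairwise_cons.mp hs).1 y hy
      have hs' : s'.Pairwise (fun a b => b.2 ≤ a.2) := (List.pairwise_cons.mp hs).2
      by_cases hlt : z.2 < x.2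
      · -- x is inserted in front of z
        have : PySem.List.insertBy (fun a b => decide (b.2 < a.2)) x (z :: s') = x :: z :: s' := by
          simp [PySem.List.insertBy, hlt]
        rw [this]
        cases hf : (z :: s').find? q with
        | none =>
            cases hqx : q x
            · rw [List.find?_cons_of_neg (by simp [hqx]), hf]; simp
            · rw [List.find?_cons_of_pos (by simp [hqx])]; simp
        | some y =>
            have hy2 : y.2 < x.2 := by
              have hmem := List.mem_of_find?_eq_some hf
              rcases List.mem_cons.mp hmem with rfl | hmem'
              · exact hlt
              · exact lt_of_le_of_lt (hz y hmem') hlt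
            cases hqx : q x
            · rw [List.find?_cons_of_neg (by simp [hqx]), hf]; simp
            · rw [List.find?_cons_of_pos (by simp [hqx])]; simp [hy2]
      · -- x goes after z
        have : PySem.List.insertBy (fun a b => decide (b.2 < a.2)) x (z :: s') =
            z :: PySem.List.insertBy (fun a b => decide (b.2 < a.2)) x s' := by
          simp [PySem.List.insertBy, hlt]
        rw [this]
        cases hqz : q z
        · simp [List.find?, hqz, ih hs']
        · simp [List.find?, hqz, hlt]

-- first qualifying element of the descending stable sort = result of the left max-scan
lemma find?_sorted_rev_eq_foldl (q : Int × Int → Bool) (l : List (Int × Int)) :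
    (PySem.List.sorted l (fun p => p.2) true).find? q =
      l.foldl (fun best p => match best with
        | none => if q p then some p else none
        | some y => if q p && decide (y.2 < p.2) then some p else some y) none := by
  induction l using List.reverseRecOn with
  | nil => rfl
  | append_singleton l x ih =>
      have h1 : PySem.List.sorted (l ++ [x]) (fun p : Int × Int => p.2) true =
          PySem.List.insertBy (fun a b => decide (b.2 < a.2)) x
            (PySem.List.sorted l (fun p => p.2) true) := by
        rw [PySem.List.sorted_rev_eq_foldl_insertBy, PySem.List.sorted_rev_eq_foldl_insertBy,
          List.foldl_append]
        rfl
      rw [h1, find?_insertBy q x _ (PySem.List.sorted_pairwise_rev l (fun p => p.2)), ih,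
        List.foldl_append]
      rfl

-- ===== VERDICT (by name: the statement is the Claim_ definition above) =====
theorem choose_summary_source_spec : Claim_equal_choose_summary_source := by
  intro base_id sources all_parsed _
  unfold Spec_choose_summary_source choose_summary_source choose_summary_source_alt
  rw [PySem.Dict.foldl_insert_getD_add_one_eq_counter]
  rw [cssLoop_eq_find?, find?_sorted_rev_eq_foldl]
  have hstep : (fun (best : Option (Int × Int)) (p : Int × Int) => match best with
        | none => if cssQ base_id all_parsed p then some p else none
        | some y => if cssQ base_id all_parsed p && decide (y.2 < p.2) then some p else some y) =
      cssAltStep base_id all_parsed := by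
    funext best p; rw [cssAltStep_eq]
  rw [hstep]
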